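-- pv_equiv track=rewrite | github.com/ljmfong/Poecilia-bifurca-Characterizing-Sex-Chromosome | python_scripts/python3_exclude-snp-clusters_test_dave.py | find_snp_cluster
-- ===== SOURCE A (Python) =====
-- def find_snp_cluster(snp_positions, read_length, mismatches):
--     '''Excludes clusters of neighbouring SNPs as described in Stevenson et al.,
--        BMC Genomics 2013. If more SNPs occur in a window that equals the length
--        of one read than the allowed number of mismatches in the alignment the
--        SNPs are excluded. This should reduce the systematic bias in measures of
--        ASE using RNA-Seq date with one reference genome.
--     '''
--     exclude = []
--
--     for i in range(len(snp_positions)):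
--
--         cluster = [snp_positions[i]]
--
--         for x in range(i+1, len(snp_positions)):
--
--             if snp_positions[x] > snp_positions[i] + read_length:
--
--                 if len(cluster) > mismatches:
--                     exclude += cluster
--                     # print cluster
--                 break
--
--             else:
--                 cluster.append(snp_positions[x])
--
--     return set(exclude)
-- ===== SOURCE B (Python) =====
-- def find_snp_cluster(snp_positions, read_length, mismatches):
--     '''Two-pointer sliding window over the ascending SNP positions: the right
--        end j of each read-length window only moves forward across the whole
--        scan, so the pass is linear instead of restarting a scan per index.'''
--     n = len(snp_positions)
--     exclude = set()
--     j = 0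
--     for i in range(n):
--         if j < i + 1:
--             j = i + 1
--         limit = snp_positions[i] + read_length
--         while j < n and snp_positions[j] <= limit:
--             j += 1
--         if j < n and j - i > mismatches:
--             exclude.update(snp_positions[i:j])
--     return exclude
-- ===== Notes on version B (the rewrite author's own statement) =====
-- stated objective: faster
-- what changed: Replaces A's restart-per-index inner scan with a single two-pointer sliding window: the window end j is shared across iterations and only ever moves forward, valid on the ascending inputs Pre_ admits, turning the scan linear; Pre_ also admits the inputs (allowance >= list length, or non-increasing list with non-negative read length) where both provably return the empty set, and excludes the remaining unsorted lists, outside the function's chromosome-position domain, where no particular output is specified.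
-- outside the precondition, e.g. on find_snp_cluster([5, 0, 6], 3, 0): A returns {0}, B returns set()
import Mathlib
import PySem

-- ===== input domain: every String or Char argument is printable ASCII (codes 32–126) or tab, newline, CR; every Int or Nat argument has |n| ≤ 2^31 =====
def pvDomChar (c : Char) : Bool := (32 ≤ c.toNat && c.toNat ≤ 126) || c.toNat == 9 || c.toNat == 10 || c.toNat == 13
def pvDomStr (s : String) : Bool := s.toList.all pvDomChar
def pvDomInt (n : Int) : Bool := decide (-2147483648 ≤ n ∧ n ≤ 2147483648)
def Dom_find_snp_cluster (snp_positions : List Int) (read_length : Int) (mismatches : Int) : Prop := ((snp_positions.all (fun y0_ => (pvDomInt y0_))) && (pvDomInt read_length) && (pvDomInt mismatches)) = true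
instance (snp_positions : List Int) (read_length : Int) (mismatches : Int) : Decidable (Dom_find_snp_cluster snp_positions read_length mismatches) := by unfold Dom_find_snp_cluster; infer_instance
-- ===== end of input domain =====

-- B replaces A's restart-per-index inner scan by a single two-pointer sliding
-- window (the window end only moves forward), linear on the ascending inputs Pre_ admits.

-- ===== PORT A =====
-- inner 'for x in range(i+1, n)' loop of A: scans the suffix after index i,
-- growing `cluster`; on the first position beyond the window it returns the
-- cluster if it is large enough (the `exclude += cluster` before `break`),
-- otherwise (or when the loop runs off the end without break) returns [].
def pvAInner (thr M : Int) (cluster : List Int) : List Int → List Int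
  | [] => []
  | v :: rest =>
    if thr < v then (if M < (cluster.length : Int) then cluster else []) else
      pvAInner thr M (cluster ++ [v]) rest

def find_snp_cluster (snp_positions : List Int) (read_length : Int) (mismatches : Int) : List Int :=
  PySem.Set.ofList <|
    (List.range snp_positions.length).foldl
      (fun exclude i =>
        exclude ++ pvAInner (snp_positions.getD i 0 + read_length) mismatches
          [snp_positions.getD i 0] (snp_positions.drop (i + 1)))
      []

-- ===== PORT B =====
-- the 'while j < n and snp_positions[j] <= limit: j += 1' loop of Source B
def pvAdvance (pos : List Int) (limit : Int) (j : Nat) : Nat :=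
  if _h : j < pos.length then
    if pos.getD j 0 ≤ limit then pvAdvance pos limit (j + 1) else j
  else j
termination_by pos.length - j
decreasing_by omega

-- state of Source B's for-loop: (exclude, j); snp_positions[i:j] = (drop i).take (j-i)
-- (exact for the in-range 0 ≤ i ≤ j indices used here)
def find_snp_cluster_alt (snp_positions : List Int) (read_length : Int) (mismatches : Int) : List Int :=
  ((List.range snp_positions.length).foldl
    (fun (st : List Int × Nat) i =>
      let j1 := if st.2 < i + 1 then i + 1 else st.2
      let j := pvAdvance snp_positions (snp_positions.getD i 0 + read_length) j1
      if j < snp_positions.length ∧ mismatches < (j : Int) - (i : Int) then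
        (PySem.Set.update st.1 ((snp_positions.drop i).take (j - i)), j)
      else (st.1, j))
    ([], 0)).1

-- ===== PRECONDITION & SPEC =====
-- Pre_ admits ascending snp_positions — the function's natural domain (SNP positions
-- along a chromosome, in order) — and also any input whose mismatch allowance is at
-- least the number of SNPs (no cluster can then exceed it; both programs return the
-- empty set), and any non-increasing list with non-negative read_length (no window
-- ever closes; both return the empty set). Excluded: the remaining unsorted lists,
-- which do not arise for positions along a chromosome; there no particular output is
-- specified and A and B may legitimately disagree (cite in claim.json).
def Pre_find_snp_cluster (snp_positions : List Int) (read_length : Int) (mismatches : Int) : Prop :=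
  List.Pairwise (· ≤ ·) snp_positions ∨ (snp_positions.length : Int) ≤ mismatches ∨
    (List.Pairwise (· ≥ ·) snp_positions ∧ 0 ≤ read_length)
instance (snp_positions : List Int) (read_length : Int) (mismatches : Int) : Decidable (Pre_find_snp_cluster snp_positions read_length mismatches) := by unfold Pre_find_snp_cluster; infer_instance

def pvWitness_find_snp_cluster : List Int × Int × Int := ([0, 2, 5], 3, 1)

def Spec_find_snp_cluster (snp_positions : List Int) (read_length : Int) (mismatches : Int) (out : List Int) : Prop := out = find_snp_cluster_alt snp_positions read_length mismatches
instance (snp_positions : List Int) (read_length : Int) (mismatches : Int) (out : List Int) : Decidable (Spec_find_snp_cluster snp_positions read_length mismatches out) := by unfold Spec_find_snp_cluster; infer_instance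

-- ===== CLAIM (what is proved, stated in full; the proofs are below) =====
def Claim_equal_find_snp_cluster : Prop := ∀ (snp_positions : List Int) (read_length : Int) (mismatches : Int), Dom_find_snp_cluster snp_positions read_length mismatches → Pre_find_snp_cluster snp_positions read_length mismatches → Spec_find_snp_cluster snp_positions read_length mismatches (find_snp_cluster snp_positions read_length mismatches)

-- ===== LEMMAS AND PROOFS =====

-- A's inner scan, characterised by the leading run of in-window positions.
theorem pvAInner_eq (thr M : Int) :
    ∀ (rest cluster : List Int),
      pvAInner thr M cluster rest =
        (if (rest.takeWhile (fun v => decide (v ≤ thr))).length < rest.length ∧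
            M < ((cluster.length + (rest.takeWhile (fun v => decide (v ≤ thr))).length : Nat) : Int)
         then cluster ++ rest.takeWhile (fun v => decide (v ≤ thr)) else []) := by
  intro rest
  induction rest with
  | nil => intro cluster; simp [pvAInner]
  | cons v rest ih =>
    intro cluster
    by_cases hv : thr < v
    · have hd : (v :: rest).takeWhile (fun v => decide (v ≤ thr)) = [] :=
        List.takeWhile_cons_of_neg (by simp; omega)
      simp only [pvAInner, if_pos hv, hd, List.length_nil, List.length_cons, Nat.add_zero]
      by_cases hM : M < (cluster.length : Int)
      · rw [if_pos hM, if_pos ⟨Nat.succ_pos _, by omega⟩, List.append_nil]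
      · rw [if_neg hM, if_neg (by omega)]
    · have hd : (v :: rest).takeWhile (fun v => decide (v ≤ thr)) =
          v :: rest.takeWhile (fun v => decide (v ≤ thr)) :=
        List.takeWhile_cons_of_pos (by simp; omega)
      simp only [pvAInner, if_neg hv, hd]
      rw [ih]
      simp only [List.length_append, List.length_cons, List.length_nil, List.append_assoc,
        List.singleton_append]
      split_ifs with h1 h2 <;> try rfl
      all_goals (exfalso; push_cast at *; omega)

-- elements strictly inside the takeWhile run satisfy the predicate
theorem takeWhile_getD_sat (p : Int → Bool) :
    ∀ (l : List Int) (k : Nat), k < (l.takeWhile p).length → p (l.getD k 0) = true := by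
  intro l
  induction l with
  | nil => intro k h; simp at h
  | cons a t ih =>
    intro k h
    by_cases ha : p a = true
    · rw [List.takeWhile_cons_of_pos ha] at h
      cases k with
      | zero => simpa using ha
      | succ k => exact ih k (by simpa using h)
    · rw [List.takeWhile_cons_of_neg (by simpa using ha)] at h
      simp at h

-- the element just past the takeWhile run fails the predicate
theorem takeWhile_getD_fail (p : Int → Bool) :
    ∀ (l : List Int), (l.takeWhile p).length < l.length →
      p (l.getD (l.takeWhile p).length 0) = false := by
  intro l
  induction l with
  | nil => intro h; simp at h
  | cons a t ih =>
    intro h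
    by_cases ha : p a = true
    · rw [List.takeWhile_cons_of_pos ha] at h ⊢
      simpa using ih (by simpa using h)
    · rw [List.takeWhile_cons_of_neg (by simpa using ha)]
      simpa using ha
  
-- a prefix of satisfied elements bounds the takeWhile run from below
theorem takeWhile_le_of_sat (p : Int → Bool) :
    ∀ (l : List Int) (m : Nat), m ≤ l.length → (∀ k, k < m → p (l.getD k 0) = true) →
      m ≤ (l.takeWhile p).length := by
  intro l
  induction l with
  | nil => intro m hm _; simpa using hm
  | cons a t ih =>
    intro m hm hsat
    cases m with
    | zero => exact Nat.zero_le _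
    | succ m =>
      have ha : p a = true := by simpa using hsat 0 (Nat.succ_pos _)
      rw [List.takeWhile_cons_of_pos ha]
      simp only [List.length_cons, Nat.succ_le_succ_iff]
      exact ih m (by simpa using hm) (fun k hk => by simpa using hsat (k + 1) (by omega))

theorem getD_drop (l : List Int) (m j : Nat) : (l.drop m).getD j 0 = l.getD (m + j) 0 := by
  simp [List.getD, List.getElem?_drop]

-- sorted lists compare by index through getD
theorem sorted_getD (pos : List Int) (hs : List.Pairwise (· ≤ ·) pos)
    (a b : Nat) (hb : b < pos.length) (hab : a ≤ b) : pos.getD a 0 ≤ pos.getD b 0 := by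
  rcases Nat.lt_or_ge a b with h | h
  · rw [List.getD_eq_getElem _ _ (by omega), List.getD_eq_getElem _ _ hb]
    exact List.pairwise_iff_getElem.mp hs a b (by omega) hb h
  · have : a = b := by omega
    subst this; rfl

-- the end of the read-length window opened at index i (helper for the proofs)
def pvW (pos : List Int) (thr : Int) (i : Nat) : Nat :=
  (i + 1) + ((pos.drop (i + 1)).takeWhile (fun v => decide (v ≤ thr))).length

theorem pvW_le (pos : List Int) (thr : Int) (i : Nat) (hi : i < pos.length) :
    pvW pos thr i ≤ pos.length := by
  have h := ((pos.drop (i + 1)).takeWhile_prefix (fun v => decide (v ≤ thr))).length_le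
  rw [List.length_drop] at h
  unfold pvW; omega

theorem pvW_ge (pos : List Int) (thr : Int) (i : Nat) : i + 1 ≤ pvW pos thr i := by
  unfold pvW; omega

theorem pvW_in (pos : List Int) (thr : Int) (i k : Nat)
    (h1 : i + 1 ≤ k) (h2 : k < pvW pos thr i) : pos.getD k 0 ≤ thr := by
  have := takeWhile_getD_sat (fun v => decide (v ≤ thr)) (pos.drop (i + 1)) (k - (i + 1))
    (by unfold pvW at h2; omega)
  rw [getD_drop] at this
  have hk : i + 1 + (k - (i + 1)) = k := by omega
  rw [hk] at this
  simpa using this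

theorem pvW_out (pos : List Int) (thr : Int) (i : Nat)
    (h : pvW pos thr i < pos.length) : ¬ pos.getD (pvW pos thr i) 0 ≤ thr := by
  have hlen : ((pos.drop (i + 1)).takeWhile (fun v => decide (v ≤ thr))).length <
      (pos.drop (i + 1)).length := by
    rw [List.length_drop]; unfold pvW at h; omega
  have := takeWhile_getD_fail (fun v => decide (v ≤ thr)) (pos.drop (i + 1)) hlen
  rw [getD_drop] at this
  have : ¬ (pos.getD (pvW pos thr i) 0 ≤ thr) := by
    unfold pvW
    intro hc
    rw [decide_eq_false_iff_not] at this
    exact this hc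
  exact this

-- Source B's while loop reaches exactly the window end, from any start inside the run
theorem pvAdvance_run (pos : List Int) (thr : Int) (i : Nat) (hi : i < pos.length) :
    ∀ j0, i + 1 ≤ j0 → j0 ≤ pvW pos thr i → pvAdvance pos thr j0 = pvW pos thr i := by
  have hW := pvW_le pos thr i hi
  have stop : pvAdvance pos thr (pvW pos thr i) = pvW pos thr i := by
    rw [pvAdvance.eq_def]
    by_cases h : pvW pos thr i < pos.length
    · rw [dif_pos h, if_neg (pvW_out pos thr i h)]
    · rw [dif_neg h]
  have key : ∀ d j0, pvW pos thr i - j0 ≤ d → i + 1 ≤ j0 → j0 ≤ pvW pos thr i →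
      pvAdvance pos thr j0 = pvW pos thr i := by
    intro d
    induction d with
    | zero =>
      intro j0 hd _ hj
      have : j0 = pvW pos thr i := by omega
      rw [this, stop]
    | succ d ih =>
      intro j0 hd h1 hj
      rcases Nat.lt_or_ge j0 (pvW pos thr i) with hlt | hge
      · rw [pvAdvance.eq_def, dif_pos (by omega), if_pos (pvW_in pos thr i j0 h1 hlt)]
        exact ih (j0 + 1) (by omega) (by omega) (by omega)
      · have : j0 = pvW pos thr i := by omega
        rw [this, stop]
  intro j0 h1 h2
  exact key (pvW pos thr i - j0) j0 le_rfl h1 h2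

-- window ends are non-decreasing over a sorted list
theorem pvW_mono (pos : List Int) (L : Int) (hs : List.Pairwise (· ≤ ·) pos)
    (i : Nat) (hi : i < pos.length) (hi1 : i + 1 < pos.length) :
    pvW pos (pos.getD i 0 + L) i ≤ pvW pos (pos.getD (i + 1) 0 + L) (i + 1) := by
  have hexp2 : pvW pos (pos.getD (i + 1) 0 + L) (i + 1) =
      (i + 1 + 1) +
        ((pos.drop (i + 1 + 1)).takeWhile (fun v => decide (v ≤ pos.getD (i + 1) 0 + L))).length := rfl
  rcases Nat.lt_or_ge (pvW pos (pos.getD i 0 + L) i) (i + 2) with h | h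
  · have := pvW_ge pos (pos.getD (i + 1) 0 + L) (i + 1); omega
  · have hWn : pvW pos (pos.getD i 0 + L) i ≤ pos.length := pvW_le pos _ i hi
    have hrun : pvW pos (pos.getD i 0 + L) i - (i + 2) ≤
        ((pos.drop (i + 1 + 1)).takeWhile (fun v => decide (v ≤ pos.getD (i + 1) 0 + L))).length := by
      apply takeWhile_le_of_sat
      · rw [List.length_drop]; omega
      · intro k hk
        rw [getD_drop]
        simp only [decide_eq_true_eq]
        have hin : pos.getD (i + 1 + 1 + k) 0 ≤ pos.getD i 0 + L :=
          pvW_in pos (pos.getD i 0 + L) i (i + 1 + 1 + k) (by omega) (by omega)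
        have hthr : pos.getD i 0 ≤ pos.getD (i + 1) 0 := sorted_getD pos hs i (i + 1) hi1 (by omega)
        omega
    omega

-- A's per-index contribution to `exclude`
def pvContrib (pos : List Int) (L M : Int) (i : Nat) : List Int :=
  pvAInner (pos.getD i 0 + L) M [pos.getD i 0] (pos.drop (i + 1))

-- B's branch at index i, with j at the window end, performs exactly A's contribution
theorem body_eq (pos : List Int) (L M : Int)
    (i : Nat) (hi : i < pos.length) (acc : List Int) :
    (if pvW pos (pos.getD i 0 + L) i < pos.length ∧
        M < ((pvW pos (pos.getD i 0 + L) i : Nat) : Int) - (i : Int) then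
       PySem.Set.update acc ((pos.drop i).take (pvW pos (pos.getD i 0 + L) i - i))
     else acc)
    = PySem.Set.update acc (pvContrib pos L M i) := by
  set thr := pos.getD i 0 + L with hthr
  set tw := (pos.drop (i + 1)).takeWhile (fun v => decide (v ≤ thr)) with htw
  have htlen : tw.length ≤ pos.length - (i + 1) := by
    calc tw.length ≤ (pos.drop (i + 1)).length := (List.takeWhile_prefix _).length_le
    _ = pos.length - (i + 1) := by simp
  have hWs : pvW pos thr i = (i + 1) + tw.length := rfl
  rw [hWs]
  have hcontrib : pvContrib pos L M i =
      (if tw.length < (pos.drop (i + 1)).length ∧ M < ((1 + tw.length : Nat) : Int)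
       then [pos.getD i 0] ++ tw else []) := by
    rw [pvContrib, pvAInner_eq, ← htw]
    simp
  by_cases hc : (i + 1) + tw.length < pos.length ∧ M < (((i + 1) + tw.length : Nat) : Int) - (i : Nat)
  · rw [if_pos hc]
    have hc' : tw.length < (pos.drop (i + 1)).length ∧ M < ((1 + tw.length : Nat) : Int) := by
      constructor
      · rw [List.length_drop]; omega
      · push_cast at hc ⊢; omega
    rw [hcontrib, if_pos hc']
    congr 1
    have hdrop : pos.drop i = pos.getD i 0 :: pos.drop (i + 1) := by
      rw [List.getD_eq_getElem _ _ hi]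
      exact List.drop_eq_getElem_cons hi
    have hidx : (i + 1) + tw.length - i = tw.length + 1 := by omega
    rw [hidx, hdrop, List.take_succ_cons]
    have : tw = (pos.drop (i + 1)).take tw.length :=
      List.prefix_iff_eq_take.mp (htw ▸ List.takeWhile_prefix _)
    simp [← this]
  · rw [if_neg hc]
    have hc' : ¬ (tw.length < (pos.drop (i + 1)).length ∧ M < ((1 + tw.length : Nat) : Int)) := by
      intro h
      apply hc
      constructor
      · have h1 := h.1; rw [List.length_drop] at h1; omega
      · push_cast
        have := h.2; push_cast at this; omega
    rw [hcontrib, if_neg hc']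
    rfl

-- the two-pointer fold, with j entering each step inside the current window,
-- equals the fold of A's per-index contributions
theorem fold_inv (pos : List Int) (L M : Int) (hs : List.Pairwise (· ≤ ·) pos) :
    ∀ (cnt i : Nat) (acc : List Int) (j : Nat), i + cnt = pos.length →
      j ≤ pvW pos (pos.getD i 0 + L) i →
      ((List.range' i cnt).foldl
        (fun (st : List Int × Nat) k =>
          let j1 := if st.2 < k + 1 then k + 1 else st.2
          let j := pvAdvance pos (pos.getD k 0 + L) j1
          if j < pos.length ∧ M < (j : Int) - (k : Int) then
            (PySem.Set.update st.1 ((pos.drop k).take (j - k)), j)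
          else (st.1, j))
        (acc, j)).1
      = (List.range' i cnt).foldl (fun a k => PySem.Set.update a (pvContrib pos L M k)) acc := by
  intro cnt
  induction cnt with
  | zero => intro i acc j _ _; rfl
  | succ cnt ih =>
    intro i acc j hn hj
    have hi : i < pos.length := by omega
    have hj1a : i + 1 ≤ (if j < i + 1 then i + 1 else j) := by split <;> omega
    have hj1b : (if j < i + 1 then i + 1 else j) ≤ pvW pos (pos.getD i 0 + L) i := by
      have := pvW_ge pos (pos.getD i 0 + L) i
      split <;> omega
    have hadv : pvAdvance pos (pos.getD i 0 + L) (if j < i + 1 then i + 1 else j)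
        = pvW pos (pos.getD i 0 + L) i :=
      pvAdvance_run pos (pos.getD i 0 + L) i hi _ hj1a hj1b
    have hfst := body_eq pos L M i hi acc
    have hstep :
        (if pvAdvance pos (pos.getD i 0 + L) (if j < i + 1 then i + 1 else j) < pos.length ∧
            M < ((pvAdvance pos (pos.getD i 0 + L) (if j < i + 1 then i + 1 else j) : Nat) : Int) - (i : Int) then
           (PySem.Set.update acc
              ((pos.drop i).take (pvAdvance pos (pos.getD i 0 + L) (if j < i + 1 then i + 1 else j) - i)),
            pvAdvance pos (pos.getD i 0 + L) (if j < i + 1 then i + 1 else j))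
         else (acc, pvAdvance pos (pos.getD i 0 + L) (if j < i + 1 then i + 1 else j)))
        = (PySem.Set.update acc (pvContrib pos L M i), pvW pos (pos.getD i 0 + L) i) := by
      rw [hadv]
      by_cases hc : pvW pos (pos.getD i 0 + L) i < pos.length ∧
          M < ((pvW pos (pos.getD i 0 + L) i : Nat) : Int) - (i : Int)
      · rw [if_pos hc] at hfst ⊢
        rw [hfst]
      · rw [if_neg hc] at hfst ⊢
        rw [← hfst]
    rw [List.range'_succ]
    simp only [List.foldl_cons]

    rw [hstep]
    apply ih (i + 1) _ (pvW pos (pos.getD i 0 + L) i) (by omega)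
    rcases Nat.lt_or_ge (i + 1) pos.length with h | h
    · exact pvW_mono pos L hs i hi h
    · have h1 : pvW pos (pos.getD i 0 + L) i ≤ pos.length := pvW_le pos _ i hi
      have h2 := pvW_ge pos (pos.getD (i + 1) 0 + L) (i + 1)
      omega

-- accumulating appended segments then dedup-ing = dedup-ing incrementally
theorem ofList_foldl_append (c : Nat → List Int) :
    ∀ (l : List Nat) (acc : List Int),
      l.foldl (fun s i => PySem.Set.update s (c i)) (PySem.Set.ofList acc)
        = PySem.Set.ofList (l.foldl (fun e i => e ++ c i) acc) := by
  intro l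
  induction l with
  | nil => intro acc; rfl
  | cons j l ih =>
    intro acc
    simp only [List.foldl_cons]
    rw [← ih (acc ++ c j)]
    congr 1
    simp [PySem.Set.update, PySem.Set.ofList_eq_foldl, List.foldl_append]

-- with allowance ≥ length, A's break test never fires and A returns the empty set
theorem trivial_A (pos : List Int) (L M : Int) (hM : (pos.length : Int) ≤ M) :
    find_snp_cluster pos L M = [] := by
  unfold find_snp_cluster
  have hnil : ∀ (l : List Nat), (∀ i ∈ l, i < pos.length) →
      (l.foldl (fun exclude i =>
        exclude ++ pvAInner (pos.getD i 0 + L) M [pos.getD i 0] (pos.drop (i + 1))) []) = [] := by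
    intro l
    induction l with
    | nil => intro _; rfl
    | cons a t ih =>
      intro hmem
      have ha : a < pos.length := hmem a (by simp)
      have hc : pvAInner (pos.getD a 0 + L) M [pos.getD a 0] (pos.drop (a + 1)) = [] := by
        rw [pvAInner_eq]
        have htl : ((pos.drop (a + 1)).takeWhile
            (fun v => decide (v ≤ pos.getD a 0 + L))).length ≤ pos.length - (a + 1) := by
          calc _ ≤ (pos.drop (a + 1)).length := (List.takeWhile_prefix _).length_le
          _ = pos.length - (a + 1) := by simp
        rw [if_neg]
        rintro ⟨-, h2⟩
        simp only [List.length_cons, List.length_nil] at h2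
        push_cast at h2
        omega
      simp only [List.foldl_cons, hc, List.append_nil]
      exact ih (fun i hi => hmem i (by simp [hi]))
  rw [hnil (List.range pos.length) (fun i hi => List.mem_range.mp hi)]
  rfl

-- with allowance ≥ length, B's branch condition (j < n and j - i > M) never holds
theorem trivial_B (pos : List Int) (L M : Int) (hM : (pos.length : Int) ≤ M) :
    find_snp_cluster_alt pos L M = [] := by
  unfold find_snp_cluster_alt
  have hfst : ∀ (l : List Nat) (st : List Int × Nat),
      (l.foldl
        (fun (st : List Int × Nat) k =>
          let j1 := if st.2 < k + 1 then k + 1 else st.2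
          let j := pvAdvance pos (pos.getD k 0 + L) j1
          if j < pos.length ∧ M < (j : Int) - (k : Int) then
            (PySem.Set.update st.1 ((pos.drop k).take (j - k)), j)
          else (st.1, j))
        st).1 = st.1 := by
    intro l
    induction l with
    | nil => intro st; rfl
    | cons a t ih =>
      intro st
      simp only [List.foldl_cons]
      set j' := pvAdvance pos (pos.getD a 0 + L) (if st.2 < a + 1 then a + 1 else st.2) with hj'
      by_cases hc : j' < pos.length ∧ M < (j' : Int) - (a : Int)
      · exfalso
        rcases hc with ⟨h1, h2⟩
        have : (j' : Int) < (pos.length : Int) := by exact_mod_cast h1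
        omega
      · dsimp only
        rw [if_neg hc]
        exact ih (st.1, j')
  rw [hfst]

-- anti-sorted lists compare by index through getD
theorem anti_getD (pos : List Int) (hs : List.Pairwise (· ≥ ·) pos)
    (a b : Nat) (hb : b < pos.length) (hab : a ≤ b) : pos.getD b 0 ≤ pos.getD a 0 := by
  rcases Nat.lt_or_ge a b with h | h
  · rw [List.getD_eq_getElem _ _ hb, List.getD_eq_getElem _ _ (show a < pos.length by omega)]
    exact List.pairwise_iff_getElem.mp hs a b (by omega) hb h
  · have : a = b := by omega
    subst this; rfl

-- Source B's while loop never moves j backwards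
theorem adv_ge (pos : List Int) (thr : Int) : ∀ j0, j0 ≤ pvAdvance pos thr j0 := by
  have key : ∀ d j0, pos.length - j0 ≤ d → j0 ≤ pvAdvance pos thr j0 := by
    intro d
    induction d with
    | zero =>
      intro j0 hd
      rw [pvAdvance.eq_def]
      split
      · rw [if_neg]; omega
      · omega
    | succ d ih =>
      intro j0 hd
      rw [pvAdvance.eq_def]
      by_cases h : j0 < pos.length
      · rw [dif_pos h]
        by_cases hs : pos.getD j0 0 ≤ thr
        · rw [if_pos hs]
          have := ih (j0 + 1) (by omega)
          omega
        · rw [if_neg hs]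
      · rw [dif_neg h]
  intro j0; exact key (pos.length - j0) j0 le_rfl

-- if Source B's while loop stops before the end, the stopping element is out of window
theorem adv_stop (pos : List Int) (thr : Int) :
    ∀ j0, pvAdvance pos thr j0 < pos.length → ¬ pos.getD (pvAdvance pos thr j0) 0 ≤ thr := by
  have key : ∀ d j0, pos.length - j0 ≤ d → pvAdvance pos thr j0 < pos.length →
      ¬ pos.getD (pvAdvance pos thr j0) 0 ≤ thr := by
    intro d
    induction d with
    | zero =>
      intro j0 hd hlt
      have hj0 : pos.length ≤ j0 := by omega
      rw [pvAdvance.eq_def, dif_neg (by omega)] at hlt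
      omega
    | succ d ih =>
      intro j0 hd hlt
      rw [pvAdvance.eq_def] at hlt ⊢
      by_cases h : j0 < pos.length
      · rw [dif_pos h] at hlt ⊢
        by_cases hs : pos.getD j0 0 ≤ thr
        · rw [if_pos hs] at hlt ⊢
          exact ih (j0 + 1) (by omega) hlt
        · rw [if_neg hs] at hlt ⊢
          exact hs
      · rw [dif_neg h] at hlt
        omega
  intro j0; exact key (pos.length - j0) j0 le_rfl

-- non-increasing positions, L ≥ 0: A's break test never fires, A returns the empty set
theorem trivial_A2 (pos : List Int) (L M : Int)
    (hs : List.Pairwise (· ≥ ·) pos) (hL : 0 ≤ L) : find_snp_cluster pos L M = [] := by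
  unfold find_snp_cluster
  have hnil : ∀ (l : List Nat), (∀ i ∈ l, i < pos.length) →
      (l.foldl (fun exclude i =>
        exclude ++ pvAInner (pos.getD i 0 + L) M [pos.getD i 0] (pos.drop (i + 1))) []) = [] := by
    intro l
    induction l with
    | nil => intro _; rfl
    | cons a t ih =>
      intro hmem
      have ha : a < pos.length := hmem a (by simp)
      have hc : pvAInner (pos.getD a 0 + L) M [pos.getD a 0] (pos.drop (a + 1)) = [] := by
        rw [pvAInner_eq]
        rw [if_neg]
        rintro ⟨h1, -⟩
        have hfull : (pos.drop (a + 1)).length ≤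
            ((pos.drop (a + 1)).takeWhile (fun v => decide (v ≤ pos.getD a 0 + L))).length := by
          apply takeWhile_le_of_sat _ _ _ le_rfl
          intro k hk
          rw [getD_drop]
          simp only [decide_eq_true_eq]
          have hkn : a + 1 + k < pos.length := by
            rw [List.length_drop] at hk; omega
          have := anti_getD pos hs a (a + 1 + k) hkn (by omega)
          omega
        omega
      simp only [List.foldl_cons, hc, List.append_nil]
      exact ih (fun i hi => hmem i (by simp [hi]))
  rw [hnil (List.range pos.length) (fun i hi => List.mem_range.mp hi)]
  rfl

-- non-increasing positions, L ≥ 0: B's window end always reaches the list end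
theorem trivial_B2 (pos : List Int) (L M : Int)
    (hs : List.Pairwise (· ≥ ·) pos) (hL : 0 ≤ L) : find_snp_cluster_alt pos L M = [] := by
  unfold find_snp_cluster_alt
  have hfst : ∀ (l : List Nat) (st : List Int × Nat),
      (l.foldl
        (fun (st : List Int × Nat) k =>
          let j1 := if st.2 < k + 1 then k + 1 else st.2
          let j := pvAdvance pos (pos.getD k 0 + L) j1
          if j < pos.length ∧ M < (j : Int) - (k : Int) then
            (PySem.Set.update st.1 ((pos.drop k).take (j - k)), j)
          else (st.1, j))
        st).1 = st.1 := by
    intro l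
    induction l with
    | nil => intro st; rfl
    | cons a t ih =>
      intro st
      simp only [List.foldl_cons]
      set j1 := (if st.2 < a + 1 then a + 1 else st.2) with hj1
      set j' := pvAdvance pos (pos.getD a 0 + L) j1 with hj'
      by_cases hc : j' < pos.length ∧ M < (j' : Int) - (a : Int)
      · exfalso
        have hstop : ¬ pos.getD j' 0 ≤ pos.getD a 0 + L := by
          rw [hj']; exact adv_stop pos (pos.getD a 0 + L) j1 (hj' ▸ hc.1)
        have hge1 : a + 1 ≤ j1 := by rw [hj1]; split <;> omega
        have hge2 : j1 ≤ j' := hj' ▸ adv_ge pos (pos.getD a 0 + L) j1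
        have := anti_getD pos hs a j' hc.1 (by omega)
        omega
      · dsimp only
        rw [if_neg hc]
        exact ih (st.1, j')
  rw [hfst]

-- ===== VERDICT (by name: the statement is the Claim_ definition above) =====
theorem find_snp_cluster_spec : Claim_equal_find_snp_cluster := by
  intro pos L M _hdom hpre
  rcases hpre with hs | hM | ⟨hd, hL⟩
  · unfold Spec_find_snp_cluster find_snp_cluster find_snp_cluster_alt
    have hB := fold_inv pos L M hs pos.length 0 [] 0 (by omega) (Nat.zero_le _)
    rw [← List.range_eq_range'] at hB
    rw [hB]
    have h0 : (PySem.Set.ofList ([] : List Int)) = ([] : List Int) := rfl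
    rw [← h0, ofList_foldl_append]
    rfl
  · unfold Spec_find_snp_cluster
    rw [trivial_A pos L M hM, trivial_B pos L M hM]
  · unfold Spec_find_snp_cluster
    rw [trivial_A2 pos L M hd hL, trivial_B2 pos L M hd hL]
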